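-- pv_equiv track=rewrite | github.com/OMARg404/compression-backend | app.py | lzw_compress
-- ===== SOURCE A (Python) =====
-- def lzw_compress(input_string):
--     dictionary = {chr(i): i for i in range(128)}
--     dict_size = 128
--     current_string = ""
--     compressed_data = []
--
--     for char in input_string:
--         combined_string = current_string + char
--         if combined_string in dictionary:
--             current_string = combined_string
--         else:
--             compressed_data.append(dictionary[current_string])
--             dictionary[combined_string] = dict_size
--             dict_size += 1
--             current_string = char
--
--     if current_string:
--         compressed_data.append(dictionary[current_string])
--
--     return compressed_data
-- ===== SOURCE B (Python) =====
-- def lzw_compress(input_string):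
--     # Phrase-at-a-time LZW: an outer while loop over positions walks an
--     # explicit trie (list of per-node child dicts) to the longest known
--     # phrase, emits its code, and grows the trie by one child node.
--     children = [dict() for _ in range(128)]  # children[code] : char -> code
--     out = []
--     i, n = 0, len(input_string)
--     while i < n:
--         node = ord(input_string[i])
--         j = i + 1
--         while j < n and input_string[j] in children[node]:
--             node = children[node][input_string[j]]
--             j += 1
--         out.append(node)
--         if j < n:
--             children[node][input_string[j]] = len(children)
--             children.append(dict())
--         i = j
--     return out
-- ===== Notes on version B (the rewrite author's own statement) =====
-- stated objective: alternative
-- what changed: Replaces A's per-character state machine over a dictionary of growing strings by a phrase-at-a-time outer loop that walks an explicit trie (a list of per-node child dicts) to the longest known phrase before emitting, so no phrase string is ever built or hashed.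
import Mathlib
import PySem

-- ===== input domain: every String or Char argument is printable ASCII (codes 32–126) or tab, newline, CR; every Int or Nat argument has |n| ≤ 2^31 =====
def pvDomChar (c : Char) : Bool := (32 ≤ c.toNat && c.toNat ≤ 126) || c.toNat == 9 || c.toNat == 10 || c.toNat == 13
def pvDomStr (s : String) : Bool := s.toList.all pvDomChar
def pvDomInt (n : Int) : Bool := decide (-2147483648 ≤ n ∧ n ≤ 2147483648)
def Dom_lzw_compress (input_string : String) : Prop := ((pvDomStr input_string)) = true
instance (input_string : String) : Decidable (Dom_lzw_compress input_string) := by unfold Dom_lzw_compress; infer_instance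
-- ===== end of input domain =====

-- B replaces A's per-character state machine over a dictionary of growing
-- strings by a phrase-at-a-time walk of an explicit trie (list of per-node
-- child dicts); objective: alternative algorithm, same results.


-- ===== PORT A =====
-- Python strings are represented as List Char (PySem's string domain).
-- {chr(i): i for i in range(128)}
def lzwBaseDict : PySem.Dict (List Char) Int :=
  (PySem.List.pyRange 0 128 1).foldl
    (fun d i => d.insert [Char.ofNat i.toNat] i) PySem.Dict.empty

-- one iteration of A's for-loop over state (dictionary, dict_size, current_string, compressed_data)
def lzwStepA (st : PySem.Dict (List Char) Int × Int × List Char × List Int) (ch : Char) :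
    PySem.Dict (List Char) Int × Int × List Char × List Int :=
  match st with
  | (d, size, cur, out) =>
    let comb := cur ++ [ch]
    if d.contains comb then (d, size, comb, out)
    else
      -- dictionary[current_string]: key always present when reached; getD's default is never used there
      (d.insert comb size, size + 1, [ch], out ++ [d.getD cur 0])

def lzw_compress (input_string : String) : List Int :=
  match input_string.toList.foldl lzwStepA (lzwBaseDict, 128, [], []) with
  | (d, _, cur, out) => if cur ≠ [] then out ++ [d.getD cur 0] else out

-- ===== PORT B =====
-- inner while loop: walk the trie from node `node` consuming chars cs[j], cs[j+1], …
-- while a child exists; children[node] is a Python list index, always in range: getD's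
-- default is never used when 0 ≤ node < children.length (invariant of the algorithm).
def lzwWalk (cs : List Char) (children : List (PySem.Dict Char Int)) (node : Int) (j : Nat) :
    Int × Nat :=
  if h : j < cs.length then
    match (children.getD node.toNat PySem.Dict.empty).get? cs[j] with
    | some nxt => lzwWalk cs children nxt (j + 1)
    | none => (node, j)
  else (node, j)
termination_by cs.length - j

-- the inner walk never moves backwards (cited by lzwPhrases' termination proof)
lemma lzwWalk_ge (cs : List Char) (children : List (PySem.Dict Char Int)) :
    ∀ (node : Int) (j : Nat), j ≤ (lzwWalk cs children node j).2 := by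
  intro node j
  induction hk : cs.length - j generalizing node j with
  | zero =>
    rw [lzwWalk]
    split
    · omega
    · exact le_refl _
  | succ k ih =>
    rw [lzwWalk]
    split
    · rename_i h
      cases hm : (children.getD node.toNat PySem.Dict.empty).get? cs[j] with
      | some nxt =>
        simp only [hm]
        have := ih nxt (j + 1) (by omega)
        omega
      | none => simp [hm]
    · exact le_refl _

-- outer while loop: one iteration per emitted phrase
def lzwPhrases (cs : List Char) (children : List (PySem.Dict Char Int)) (i : Nat)
    (out : List Int) : List Int :=
  if h : i < cs.length then
    let w := lzwWalk cs children ((cs[i].toNat : Int)) (i + 1)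
    if h2 : w.2 < cs.length then
      lzwPhrases cs
        ((children.set w.1.toNat
            ((children.getD w.1.toNat PySem.Dict.empty).insert cs[w.2] (children.length : Int)))
          ++ [PySem.Dict.empty])
        w.2 (out ++ [w.1])
    else out ++ [w.1]
  else out
termination_by cs.length - i
decreasing_by
  have := lzwWalk_ge cs children ((cs[i].toNat : Int)) (i + 1)
  omega

def lzw_compress_alt (input_string : String) : List Int :=
  lzwPhrases input_string.toList (List.replicate 128 PySem.Dict.empty) 0 []

-- ===== PRECONDITION & SPEC =====
def Spec_lzw_compress (input_string : String) (out : List Int) : Prop := out = lzw_compress_alt input_string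
instance (input_string : String) (out : List Int) : Decidable (Spec_lzw_compress input_string out) := by unfold Spec_lzw_compress; infer_instance

-- ===== CLAIM (what is proved, stated in full; the proofs are below) =====
def Claim_equal_lzw_compress : Prop := ∀ (input_string : String), Dom_lzw_compress input_string → Spec_lzw_compress input_string (lzw_compress input_string)

-- ===== LEMMAS AND PROOFS =====

-- coupling invariant between A's string dictionary and B's trie
def LzwInv (d : PySem.Dict (List Char) Int) (ch : List (PySem.Dict Char Int)) : Prop :=
  128 ≤ ch.length ∧
  d.get? [] = none ∧
  (∀ c : Char, c.toNat < 128 → d.get? [c] = some (c.toNat : Int)) ∧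
  (∀ l p, d.get? l = some p → 0 ≤ p ∧ p < (ch.length : Int)) ∧
  (∀ l1 l2 p, d.get? l1 = some p → d.get? l2 = some p → l1 = l2) ∧
  (∀ l c, (d.get? (l ++ [c])).isSome → l ≠ [] → (d.get? l).isSome) ∧
  (∀ l p c, d.get? l = some p →
    d.get? (l ++ [c]) = (ch.getD p.toNat PySem.Dict.empty).get? c)

-- the tail of A's run: fold the remaining chars, then the final `if current_string:` emit
def lzwFinishA (st : PySem.Dict (List Char) Int × Int × List Char × List Int) : List Int :=
  match st with
  | (d, _, cur, out) => if cur ≠ [] then out ++ [d.getD cur 0] else out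

lemma lzwBaseAux (n : Nat) (hn : n ≤ 128) (l : List Char) :
    ((PySem.List.pyRange 0 (n : Int) 1).foldl
        (fun d i => d.insert [Char.ofNat i.toNat] i) PySem.Dict.empty).get? l =
      match l with
      | [c] => if c.toNat < n then some (c.toNat : Int) else none
      | _ => none := by
  induction n with
  | zero =>
    have h0 : PySem.List.pyRange 0 ((0 : Nat) : Int) 1 = [] := by decide
    rw [h0]
    match l with
    | [] => simp
    | [c] => simp
    | _ :: _ :: _ => simp
  | succ n ih =>
    have hrng : PySem.List.pyRange 0 ((n : Nat) + 1 : Int) 1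
        = PySem.List.pyRange 0 (n : Int) 1 ++ [(n : Int)] :=
      PySem.List.pyRange_one_succ_right (by positivity)
    have hcast : ((n + 1 : Nat) : Int) = ((n : Nat) : Int) + 1 := by push_cast; ring
    rw [hcast, hrng, List.foldl_append]
    simp only [List.foldl_cons, List.foldl_nil]
    rw [PySem.Dict.get?_insert]
    have htn : (Char.ofNat ((n : Int)).toNat).toNat = n := by
      have hv : Nat.isValidChar n := by left; omega
      simp [Char.toNat_ofNat, hv]
    split_ifs with hl
    · subst hl
      simp only [htn]
      have : n < n + 1 := Nat.lt_succ_self n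
      simp [this]
    · rw [ih (by omega)]
      match l with
      | [] => simp
      | [c] =>
        simp only []
        by_cases hlt : c.toNat < n
        · simp [hlt, (by omega : c.toNat < n + 1)]
        · have hne : c.toNat ≠ n := by
            intro he
            apply hl
            have : c = Char.ofNat ((n : Int)).toNat := by
              rw [show ((n : Int)).toNat = n by omega, ← he, Char.ofNat_toNat]
            rw [this]
          simp only [if_neg hlt, if_neg (by omega : ¬ c.toNat < n + 1)]
      | _ :: _ :: _ => simp

lemma lzwBaseDict_get? (l : List Char) :
    lzwBaseDict.get? l =
      match l with
      | [c] => if c.toNat < 128 then some (c.toNat : Int) else none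
      | _ => none := by
  have := lzwBaseAux 128 (le_refl _) l
  simpa [lzwBaseDict] using this

lemma replicate_getD_empty (k : Nat) :
    ((List.replicate 128 (PySem.Dict.empty (κ := Char) (ν := Int))).getD k
      PySem.Dict.empty) = PySem.Dict.empty := by
  rw [List.getD_eq_getElem?_getD, List.getElem?_replicate]
  split_ifs <;> rfl

lemma lzwInit_inv : LzwInv lzwBaseDict (List.replicate 128 PySem.Dict.empty) := by
  have hchar : ∀ l (p : Int), lzwBaseDict.get? l = some p →
      ∃ c : Char, l = [c] ∧ c.toNat < 128 ∧ p = (c.toNat : Int) := by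
    intro l p h
    rw [lzwBaseDict_get?] at h
    match l with
    | [] => simp at h
    | [c] =>
      refine ⟨c, rfl, ?_, ?_⟩ <;> by_cases hlt : c.toNat < 128 <;>
        simp [hlt] at h <;> simp [hlt, h.symm]
    | _ :: _ :: _ => simp at h
  refine ⟨by simp, by rw [lzwBaseDict_get?], ?_, ?_, ?_, ?_, ?_⟩
  · intro c hlt
    rw [lzwBaseDict_get?]
    simp [hlt]
  · intro l p h
    obtain ⟨c, -, hlt, hp⟩ := hchar l p h
    subst hp
    constructor
    · positivity
    · simp only [List.length_replicate]
      exact_mod_cast hlt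
  · intro l1 l2 p h1 h2
    obtain ⟨c1, he1, -, hp1⟩ := hchar l1 p h1
    obtain ⟨c2, he2, -, hp2⟩ := hchar l2 p h2
    have : c1.toNat = c2.toNat := by rw [hp1] at hp2; exact_mod_cast hp2
    have : c1 = c2 := by rw [← Char.ofNat_toNat c1, this, Char.ofNat_toNat]
    rw [he1, he2, this]
  · intro l c h hne
    rw [lzwBaseDict_get?] at h
    match l, h with
    | [], _ => exact absurd rfl hne
    | [c0], h => simp at h
    | _ :: _ :: _, h => simp at h
  · intro l p c h
    obtain ⟨c0, he, -, -⟩ := hchar l p h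
    subst he
    rw [lzwBaseDict_get?, replicate_getD_empty]
    simp [PySem.Dict.get?_empty]

-- how A's fold tracks B's inner walk: A extends current_string exactly while a trie child exists
lemma lzwWalk_sim (cs : List Char) (d : PySem.Dict (List Char) Int)
    (ch : List (PySem.Dict Char Int)) (hinv : LzwInv d ch)
    (sz : Int) (out : List Int) :
    ∀ (j : Nat) (node : Int) (cur : List Char), d.get? cur = some node → cur ≠ [] →
    ∃ cur', d.get? cur' = some (lzwWalk cs ch node j).1 ∧ cur' ≠ [] ∧
      (cs.drop j).foldl lzwStepA (d, sz, cur, out)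
        = (cs.drop (lzwWalk cs ch node j).2).foldl lzwStepA (d, sz, cur', out) ∧
      (∀ h2 : (lzwWalk cs ch node j).2 < cs.length,
        (ch.getD (lzwWalk cs ch node j).1.toNat PySem.Dict.empty).get?
          (cs[(lzwWalk cs ch node j).2]'h2) = none) := by
  have hcoup := hinv.2.2.2.2.2.2
  intro j
  induction hk : cs.length - j generalizing j with
  | zero =>
    intro node cur hcur hne
    rw [lzwWalk]
    rw [dif_neg (by omega : ¬ j < cs.length)]
    exact ⟨cur, hcur, hne, rfl, fun h2 => absurd h2 (by omega)⟩
  | succ k ih =>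
    intro node cur hcur hne
    have hj : j < cs.length := by omega
    rw [lzwWalk]
    rw [dif_pos hj]
    have hkey : d.get? (cur ++ [cs[j]]) = (ch.getD node.toNat PySem.Dict.empty).get? cs[j] :=
      hcoup cur node cs[j] hcur
    have hdrop : cs.drop j = cs[j] :: cs.drop (j + 1) := List.drop_eq_getElem_cons hj
    cases hm : (ch.getD node.toNat PySem.Dict.empty).get? cs[j] with
    | some nxt =>
      simp only [hm]
      have hcont : d.contains (cur ++ [cs[j]]) = true := by
        rw [PySem.Dict.contains_eq_isSome_get?, hkey, hm]; rfl
      have hstep : lzwStepA (d, sz, cur, out) cs[j] = (d, sz, cur ++ [cs[j]], out) := by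
        simp [lzwStepA, hcont]
      obtain ⟨cur', h1, h2, h3, h4⟩ :=
        ih (j + 1) (by omega) nxt (cur ++ [cs[j]]) (by rw [hkey, hm]) (by simp)
      exact ⟨cur', h1, h2, by rw [hdrop, List.foldl_cons, hstep, h3], h4⟩
    | none =>
      simp only [hm]
      exact ⟨cur, hcur, hne, rfl, fun _ => trivial⟩

-- invariant preservation when both sides learn the new phrase
lemma lzwInv_step (d : PySem.Dict (List Char) Int) (ch : List (PySem.Dict Char Int))
    (hinv : LzwInv d ch) (cur : List Char) (node : Int) (c : Char)
    (hcur : d.get? cur = some node) (hne : cur ≠ [])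
    (hmiss : (ch.getD node.toNat PySem.Dict.empty).get? c = none) :
    LzwInv (d.insert (cur ++ [c]) (ch.length : Int))
      ((ch.set node.toNat
          ((ch.getD node.toNat PySem.Dict.empty).insert c (ch.length : Int)))
        ++ [PySem.Dict.empty]) := by
  obtain ⟨h128, hnil, hbase, hrange, hinj, hpref, hcoup⟩ := hinv
  obtain ⟨hn0, hnlt⟩ := hrange cur node hcur
  have hkN : node.toNat < ch.length := by omega
  have hcomb_none : d.get? (cur ++ [c]) = none := by
    rw [hcoup cur node c hcur]; exact hmiss
  have hg' : ∀ l, (d.insert (cur ++ [c]) (ch.length : Int)).get? l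
      = if l = cur ++ [c] then some (ch.length : Int) else d.get? l := fun l =>
    PySem.Dict.get?_insert d _ l _
  have hlen : ((ch.set node.toNat
      ((ch.getD node.toNat PySem.Dict.empty).insert c (ch.length : Int)))
        ++ [PySem.Dict.empty]).length = ch.length + 1 := by simp
  have hgd : ∀ m : Nat, ((ch.set node.toNat
      ((ch.getD node.toNat PySem.Dict.empty).insert c (ch.length : Int)))
        ++ [PySem.Dict.empty]).getD m PySem.Dict.empty
      = if m = node.toNat then (ch.getD node.toNat PySem.Dict.empty).insert c (ch.length : Int)
        else if m < ch.length then ch.getD m PySem.Dict.empty else PySem.Dict.empty := by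
    intro m
    rw [List.getD_eq_getElem?_getD]
    by_cases hmlt : m < ch.length
    · rw [List.getElem?_append_left (by simpa using hmlt), List.getElem?_set]
      by_cases hmk : m = node.toNat
      · simp [hmk, hkN]
      · rw [if_neg (fun h => hmk h.symm), if_neg hmk, if_pos hmlt,
          List.getD_eq_getElem?_getD]
    · rw [List.getElem?_append_right (by simpa using hmlt), if_neg (by omega), if_neg hmlt]
      simp only [List.length_set]
      by_cases hme : m = ch.length
      · subst hme; simp
      · rw [List.getElem?_cons, if_neg (by omega)]
        simp
  have happ_inj : ∀ (l l' : List Char) (c0 c0' : Char), l ++ [c0] = l' ++ [c0'] → l = l' ∧ c0 = c0' := by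
    intro l l' c0 c0' h
    exact List.concat_inj.mp (by simpa [List.concat] using h)
  have hcur_len : 1 ≤ cur.length := List.length_pos_of_ne_nil hne
  have hsingle : ∀ (c0 : Char), ¬ ([c0] = cur ++ [c]) := by
    intro c0 h
    have h2 := congrArg List.length h
    simp only [List.length_cons, List.length_append, List.length_nil] at h2
    omega
  refine ⟨by rw [hlen]; omega, ?_, ?_, ?_, ?_, ?_, ?_⟩
  · rw [hg', if_neg (by simp), hnil]
  · intro c0 hc0
    rw [hg', if_neg (hsingle c0)]
    exact hbase c0 hc0
  · intro l p h
    rw [hg'] at h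
    rw [hlen]
    by_cases hl : l = cur ++ [c]
    · rw [if_pos hl] at h
      have : p = (ch.length : Int) := by injection h with h'; omega
      push_cast
      omega
    · rw [if_neg hl] at h
      have := hrange _ _ h
      push_cast
      omega
  · intro l1 l2 p h1 h2
    rw [hg'] at h1 h2
    by_cases hl1 : l1 = cur ++ [c] <;> by_cases hl2 : l2 = cur ++ [c]
    · rw [hl1, hl2]
    · rw [if_pos hl1] at h1
      rw [if_neg hl2] at h2
      have hp : p = (ch.length : Int) := by injection h1 with h'; omega
      have := hrange _ _ h2
      omega
    · rw [if_neg hl1] at h1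
      rw [if_pos hl2] at h2
      have hp : p = (ch.length : Int) := by injection h2 with h'; omega
      have := hrange _ _ h1
      omega
    · rw [if_neg hl1] at h1
      rw [if_neg hl2] at h2
      exact hinj _ _ _ h1 h2
  · intro l c0 h hne0
    rw [hg'] at h ⊢
    by_cases hl : l = cur ++ [c]
    · rw [if_pos hl]; rfl
    · rw [if_neg hl]
      by_cases hlc : l ++ [c0] = cur ++ [c]
      · obtain ⟨he, -⟩ := happ_inj _ _ _ _ hlc
        subst he
        rw [hcur]; rfl
      · rw [if_neg hlc] at h
        exact hpref l c0 h hne0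
  · intro l p c0 h
    rw [hg'] at h
    rw [hg', hgd]
    by_cases hl : l = cur ++ [c]
    · rw [if_pos hl] at h
      have hp : p = (ch.length : Int) := by injection h with h'; omega
      subst hl
      subst hp
      rw [if_neg (show ¬((cur ++ [c]) ++ [c0] = cur ++ [c]) from fun hh => by
        have h2 := congrArg List.length hh
        simp only [List.length_append, List.length_cons, List.length_nil] at h2
        omega)]
      rw [if_neg (show ¬(((ch.length : Int)).toNat = node.toNat) by omega)]
      rw [if_neg (show ¬(((ch.length : Int)).toNat < ch.length) by omega)]
      have hnone : d.get? ((cur ++ [c]) ++ [c0]) = none := by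
        cases hx : d.get? ((cur ++ [c]) ++ [c0]) with
        | none => rfl
        | some w =>
          exfalso
          have := hpref _ c0 (by rw [hx]; rfl) (by simp)
          rw [hcomb_none] at this
          simp at this
      rw [hnone, PySem.Dict.get?_empty]
    · rw [if_neg hl] at h
      obtain ⟨hp0, hplt⟩ := hrange _ _ h
      by_cases hpn : p = node
      · have hlcur : l = cur := hinj l cur p h (by rw [hpn]; exact hcur)
        subst hlcur
        rw [if_pos (show p.toNat = node.toNat by omega)]
        rw [PySem.Dict.get?_insert]
        by_cases hc0 : c0 = c
        · subst hc0
          rw [if_pos rfl, if_pos rfl]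
        · rw [if_neg (show ¬(l ++ [c0] = l ++ [c]) from fun hh => hc0 (happ_inj _ _ _ _ hh).2)]
          rw [if_neg hc0]
          rw [hcoup l p c0 h, hpn]
      · rw [if_neg (show ¬(p.toNat = node.toNat) by omega)]
        rw [if_pos (show p.toNat < ch.length by omega)]
        rw [if_neg (show ¬(l ++ [c0] = cur ++ [c]) from fun hh => by
          obtain ⟨he, -⟩ := happ_inj _ _ _ _ hh
          subst he
          rw [hcur] at h
          injection h with h'
          exact hpn h'.symm)]
        exact hcoup l p c0 h

-- the outer correspondence: one phrase of B = A's fold over that phrase's chars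
lemma lzwPhrase_sim (cs : List Char) (hdom : ∀ c ∈ cs, c.toNat < 128) :
    ∀ (k i : Nat), cs.length - i ≤ k →
      ∀ (d : PySem.Dict (List Char) Int) (ch : List (PySem.Dict Char Int)) (out : List Int),
      LzwInv d ch → ∀ (h : i < cs.length),
      lzwFinishA ((cs.drop (i + 1)).foldl lzwStepA (d, (ch.length : Int), [cs[i]], out))
        = lzwPhrases cs ch i out := by
  intro k
  induction k with
  | zero => intro i hle d ch out hinv h; omega
  | succ k ih =>
    intro i hle d ch out hinv h
    have hc128 : cs[i].toNat < 128 := hdom _ (List.getElem_mem h)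
    have hcurv : d.get? [cs[i]] = some ((cs[i].toNat : Int)) := hinv.2.2.1 _ hc128
    obtain ⟨cur', hcur', hne', hfold, hstop⟩ :=
      lzwWalk_sim cs d ch hinv (ch.length : Int) out (i + 1) ((cs[i].toNat : Int)) [cs[i]]
        hcurv (by simp)
    have hge := lzwWalk_ge cs ch ((cs[i].toNat : Int)) (i + 1)
    rw [lzwPhrases, dif_pos h]
    simp only []
    rw [hfold]
    by_cases hj : (lzwWalk cs ch ((cs[i].toNat : Int)) (i + 1)).2 < cs.length
    · rw [dif_pos hj]
      set w := lzwWalk cs ch ((cs[i].toNat : Int)) (i + 1) with hw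
      have hmiss := hstop hj
      have hkey : d.get? (cur' ++ [cs[w.2]]) = none := by
        rw [hinv.2.2.2.2.2.2 cur' w.1 _ hcur']; exact hmiss
      have hdrop : cs.drop w.2 = cs[w.2] :: cs.drop (w.2 + 1) := List.drop_eq_getElem_cons hj
      have hcont : d.contains (cur' ++ [cs[w.2]]) = false := by
        rw [PySem.Dict.contains_eq_isSome_get?, hkey]; rfl
      have hgetD : d.getD cur' 0 = w.1 := by
        rw [PySem.Dict.getD_eq_get?_getD, hcur']; rfl
      have hstep : lzwStepA (d, (ch.length : Int), cur', out) cs[w.2]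
          = (d.insert (cur' ++ [cs[w.2]]) (ch.length : Int), (ch.length : Int) + 1,
             [cs[w.2]], out ++ [w.1]) := by
        simp [lzwStepA, hcont, hgetD]
      rw [hdrop, List.foldl_cons, hstep]
      have hinv' := lzwInv_step d ch hinv cur' w.1 cs[w.2] hcur' hne' hmiss
      have hlen' : ((((ch.set w.1.toNat ((ch.getD w.1.toNat PySem.Dict.empty).insert cs[w.2]
          (ch.length : Int))) ++ [PySem.Dict.empty]).length : Int)) = (ch.length : Int) + 1 := by
        simp
      have hrec := ih w.2 (by omega) _ _ (out ++ [w.1]) hinv' hj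
      rw [hlen'] at hrec
      exact hrec
    · rw [dif_neg hj]
      have hdropnil : cs.drop (lzwWalk cs ch ((cs[i].toNat : Int)) (i + 1)).2 = [] :=
        List.drop_eq_nil_of_le (by omega)
      rw [hdropnil, List.foldl_nil]
      show (if cur' ≠ [] then out ++ [d.getD cur' 0] else out) = _
      rw [if_pos hne', PySem.Dict.getD_eq_get?_getD, hcur']
      rfl

-- ===== VERDICT (by name: the statement is the Claim_ definition above) =====
theorem lzw_compress_spec : Claim_equal_lzw_compress := by
  intro s hdom
  unfold Spec_lzw_compress lzw_compress lzw_compress_alt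
  have hchars : ∀ c ∈ s.toList, c.toNat < 128 := by
    intro c hc
    have hb := List.all_eq_true.mp hdom c hc
    simp only [pvDomChar, Bool.or_eq_true, Bool.and_eq_true, decide_eq_true_eq,
      beq_iff_eq] at hb
    omega
  rcases hcs : s.toList with _ | ⟨c0, rest⟩
  · rw [lzwPhrases]
    simp
  · have hc0 : c0.toNat < 128 := hchars c0 (by rw [hcs]; exact List.mem_cons_self)
    have hcont : lzwBaseDict.contains [c0] = true := by
      rw [PySem.Dict.contains_eq_isSome_get?, lzwBaseDict_get?]
      simp [hc0]
    have hstep : lzwStepA (lzwBaseDict, 128, [], []) c0 = (lzwBaseDict, 128, [c0], []) := by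
      simp [lzwStepA, hcont]
    have hsim := lzwPhrase_sim (c0 :: rest) (by rw [← hcs]; exact hchars)
      (c0 :: rest).length 0 (by omega) lzwBaseDict (List.replicate 128 PySem.Dict.empty) []
      lzwInit_inv (by simp)
    simp only [List.length_replicate, Nat.cast_ofNat] at hsim
    rw [List.foldl_cons, hstep]
    have hfin : (match (List.foldl lzwStepA (lzwBaseDict, 128, [c0], []) rest) with
        | (d, _, cur, out) => if cur ≠ [] then out ++ [d.getD cur 0] else out)
        = lzwFinishA (List.foldl lzwStepA (lzwBaseDict, 128, [c0], []) rest) := rfl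
    rw [hfin]
    simpa using hsim
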